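-- pv_equiv track=rewrite | github.com/gaeju/- | 프로그래머스/0/181887. 홀수 vs 짝수/홀수 vs 짝수.py | solution
-- ===== SOURCE A (Python) =====
-- def solution(num_list):
--     even, odd = 0, 0
--     for idx, i in enumerate(num_list):
--         if idx % 2 == 0:
--             even += i
--         else: odd += i
--
--     if even >= odd: return even
--     else: return odd
-- ===== SOURCE B (Python) =====
-- def solution(num_list):
--     return max(sum(num_list[::2]), sum(num_list[1::2]))
-- ===== Notes on version B (the rewrite author's own statement) =====
-- stated objective: simpler
-- what changed: Replaces the indexed loop with a parity branch by summing the two strided slices num_list[::2] and num_list[1::2] and taking max; the tie (equal sums) is value-identical.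
import Mathlib
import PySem

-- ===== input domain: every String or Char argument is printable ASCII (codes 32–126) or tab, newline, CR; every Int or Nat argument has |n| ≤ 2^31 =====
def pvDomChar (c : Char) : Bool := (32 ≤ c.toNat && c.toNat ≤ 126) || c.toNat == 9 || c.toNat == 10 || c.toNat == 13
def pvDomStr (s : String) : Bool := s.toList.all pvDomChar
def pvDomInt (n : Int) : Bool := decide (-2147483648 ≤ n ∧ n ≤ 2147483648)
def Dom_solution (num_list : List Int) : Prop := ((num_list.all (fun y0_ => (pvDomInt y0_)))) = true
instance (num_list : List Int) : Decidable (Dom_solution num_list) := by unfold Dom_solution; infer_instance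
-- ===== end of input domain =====

-- B replaces A's indexed loop with a parity branch by summing the two strided
-- slices xs[::2] and xs[1::2] and taking their max (simpler decomposition).


-- ===== PORT A =====
def solution (num_list : List Int) : Int :=
  let p := (PySem.List.enumerate num_list).foldl
    (fun (ac : Int × Int) (pr : Int × Int) =>
      if PySem.Int.mod pr.1 2 = 0 then (ac.1 + pr.2, ac.2) else (ac.1, ac.2 + pr.2))
    (0, 0)
  if p.1 ≥ p.2 then p.1 else p.2

-- ===== PORT B =====
-- step 2 ≠ 0, so slice? always returns some; .getD [] only unwraps the option
def solution_alt (num_list : List Int) : Int :=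
  max ((PySem.List.slice? num_list none none 2).getD []).sum
      ((PySem.List.slice? num_list (some 1) none 2).getD []).sum

-- ===== PRECONDITION & SPEC =====
def Spec_solution (num_list : List Int) (out : Int) : Prop := out = solution_alt num_list
instance (num_list : List Int) (out : Int) : Decidable (Spec_solution num_list out) := by unfold Spec_solution; infer_instance

-- ===== CLAIM (what is proved, stated in full; the proofs are below) =====
def Claim_equal_solution : Prop := ∀ (num_list : List Int), Dom_solution num_list → Spec_solution num_list (solution num_list)

-- ===== LEMMAS AND PROOFS =====

/-- The even-index elements of a list. -/
def evens : List Int → List Int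
  | [] => []
  | [x] => [x]
  | x :: _ :: r => x :: evens r

theorem evens_cons_tail (y : Int) (r : List Int) : evens (y :: r) = y :: evens r.tail := by
  cases r <;> simp [evens]

theorem filterMap_even_idx : ∀ (xs : List Int),
    (List.range (if 0 < xs.length then (((xs.length : Int) + 2 - 1) / 2).toNat else 0)).filterMap
      (fun k : Nat => xs[((2 : Int) * (k : Int)).toNat]?) = evens xs
  | [] => by simp [evens]
  | [x] => by simp [evens, List.range_succ]
  | x :: y :: r => by
    have hc : (if 0 < (x :: y :: r).length then ((((x :: y :: r).length : Int) + 2 - 1) / 2).toNat else 0)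
        = (if 0 < r.length then (((r.length : Int) + 2 - 1) / 2).toNat else 0) + 1 := by
      simp only [List.length_cons]
      split_ifs <;> omega
    rw [hc, List.range_succ_eq_map, List.filterMap_cons, List.filterMap_map]
    have h0 : (x :: y :: r)[((2 : Int) * ((0 : Nat) : Int)).toNat]? = some x := by
      norm_num
    rw [h0]
    have hf : ((fun k : Nat => (x :: y :: r)[((2:Int) * (k : Int)).toNat]?) ∘ Nat.succ)
         = (fun k : Nat => r[((2:Int) * (k : Int)).toNat]?) := by
      funext k
      have h2 : ((2:Int) * ((Nat.succ k : Nat) : Int)).toNat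
          = ((2:Int) * (k : Int)).toNat + 1 + 1 := by omega
      simp only [Function.comp_apply, h2, List.getElem?_cons_succ]
    rw [hf, filterMap_even_idx r, evens]

theorem slice2_eq_evens (xs : List Int) :
    PySem.List.slice? xs none none 2 = some (evens xs) := by
  simp only [PySem.List.slice?, PySem.List.sliceIndices]
  norm_num
  exact filterMap_even_idx xs

theorem slice2_odd_eq_evens_tail (xs : List Int) :
    PySem.List.slice? xs (some 1) none 2 = some (evens xs.tail) := by
  cases xs with
  | nil => simp [PySem.List.slice?, PySem.List.sliceIndices, evens]
  | cons x t =>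
    simp only [PySem.List.slice?, PySem.List.sliceIndices]
    norm_num
    have hf : (fun k : Nat => (x :: t)[((1:Int) + 2 * (k : Int)).toNat]?)
         = (fun k : Nat => t[((2:Int) * (k : Int)).toNat]?) := by
      funext k
      have h2 : ((1:Int) + 2 * (k : Int)).toNat = ((2:Int) * (k : Int)).toNat + 1 := by omega
      rw [h2]
      simp [List.getElem?_cons_succ]
    rw [hf]
    exact filterMap_even_idx t

/-- Loop invariant for A's fold: starting at an even index `s`, the fold adds the
even-position sum to the first accumulator and the odd-position sum to the second. -/
theorem fold_invariant : ∀ (xs : List Int) (s e o : Int), 2 ∣ s →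
    (PySem.List.enumerate xs s).foldl
      (fun (ac : Int × Int) (pr : Int × Int) =>
        if PySem.Int.mod pr.1 2 = 0 then (ac.1 + pr.2, ac.2) else (ac.1, ac.2 + pr.2))
      (e, o)
    = (e + (evens xs).sum, o + (evens xs.tail).sum)
  | [], s, e, o, hs => by simp [PySem.List.enumerate, evens]
  | [x], s, e, o, hs => by
    have h1 : PySem.Int.mod s 2 = 0 := (PySem.Int.mod_eq_zero_iff_dvd s 2).mpr hs
    rw [PySem.List.enumerate_cons]
    simp only [List.foldl_cons, h1, if_pos]
    simp [PySem.List.enumerate, evens]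
  | x :: y :: r, s, e, o, hs => by
    have h1 : PySem.Int.mod s 2 = 0 := (PySem.Int.mod_eq_zero_iff_dvd s 2).mpr hs
    have h2 : ¬ PySem.Int.mod (s + 1) 2 = 0 := by
      rw [PySem.Int.mod_eq_zero_iff_dvd]; omega
    rw [PySem.List.enumerate_cons, PySem.List.enumerate_cons]
    simp only [List.foldl_cons, h1, h2, if_pos, if_false]
    rw [fold_invariant r (s + 1 + 1) (e + x) (o + y) (by omega)]
    rw [show evens (x :: y :: r) = x :: evens r from rfl, List.tail_cons, evens_cons_tail y r]
    simp only [List.sum_cons, Prod.mk.injEq]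
    constructor <;> ring

theorem solution_eq (num_list : List Int) : solution num_list = solution_alt num_list := by
  unfold solution solution_alt
  rw [slice2_eq_evens, slice2_odd_eq_evens_tail]
  have := fold_invariant num_list 0 0 0 ⟨0, rfl⟩
  rw [this]
  simp only [Option.getD_some, zero_add]
  by_cases h : (evens num_list.tail).sum ≤ (evens num_list).sum
  · rw [max_eq_left h, if_pos h]
  · rw [max_eq_right (by omega), if_neg (by omega)]

-- ===== VERDICT (by name: the statement is the Claim_ definition above) =====
theorem solution_spec : Claim_equal_solution := by
  intro num_list _
  exact solution_eq num_list
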